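-- pv_equiv track=rewrite | github.com/6809/dragonlib | dragonlib/core/basic.py | iter_token_values
-- ===== SOURCE A (Python) =====
-- def iter_token_values(tokens):
--     token_value = None
--     for token in tokens:
--         if token == 0xff:
--             token_value = token
--             continue
--
--         if token_value is not None:
--             yield (token_value << 8) + token
--             token_value = None
--         else:
--             yield token
-- ===== SOURCE B (Python) =====
-- def iter_token_values(tokens):
--     xs = list(tokens)
--     n = len(xs)
--     i = 0
--     while i < n:
--         t = xs[i]
--         if t != 0xff:
--             yield t
--             i += 1
--         else:
--             # skip the whole run of 0xff prefix bytes (they coalesce)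
--             while i < n and xs[i] == 0xff:
--                 i += 1
--             if i < n:
--                 yield (0xff << 8) + xs[i]
--                 i += 1
-- ===== Notes on version B (the rewrite author's own statement) =====
-- stated objective: alternative
-- what changed: Replaces the persistent token_value flag carried across the single pass by an index-driven loop that, on meeting 0xff, skips the whole run of prefix bytes and combines with the first following non-0xff byte in place (control-flow position instead of state).
import Mathlib
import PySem

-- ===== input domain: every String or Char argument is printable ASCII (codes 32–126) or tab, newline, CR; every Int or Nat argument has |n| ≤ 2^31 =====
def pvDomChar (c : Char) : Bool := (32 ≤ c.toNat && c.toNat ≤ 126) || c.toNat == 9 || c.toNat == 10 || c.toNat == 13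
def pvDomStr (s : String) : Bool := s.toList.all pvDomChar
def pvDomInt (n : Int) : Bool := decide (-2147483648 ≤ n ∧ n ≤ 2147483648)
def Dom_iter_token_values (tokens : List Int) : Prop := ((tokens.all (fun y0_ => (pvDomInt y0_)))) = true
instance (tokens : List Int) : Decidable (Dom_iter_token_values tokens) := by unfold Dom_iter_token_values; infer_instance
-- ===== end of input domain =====

-- B replaces A's persistent token_value flag by position in the loop: on 0xff it skips
-- the run of prefix bytes and combines with the next non-0xff byte in place (objective: alternative decomposition).

-- ===== PORT A =====
-- A: one pass carrying token_value (None or the last seen 0xff); on 0xff set the flag and continue,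
-- otherwise emit (flag << 8) + token if the flag is set, else the token itself.
-- (v <<< 8 is exact for Python's v << 8 on Int.)
def goA : Option Int → List Int → List Int
  | _, [] => []
  | tv, t :: rest =>
    if t = 255 then goA (some t) rest
    else match tv with
      | some v => ((v <<< 8) + t) :: goA none rest
      | none => t :: goA none rest

def iter_token_values (tokens : List Int) : List Int := goA none tokens

-- ===== PORT B =====
-- B: index loop recast as structural recursion; the inner 'while xs[i]==0xff' skip loop is dropWhile.
def goB : List Int → List Int
  | [] => []
  | t :: rest =>
    if t = 255 then
      match h : rest.dropWhile (fun x => x == 255) with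
      | [] => []
      | u :: rest' => ((255 <<< 8 : Int) + u) :: goB rest'
    else
      t :: goB rest
termination_by xs => xs.length
decreasing_by
  · have hle := List.length_dropWhile_le (fun x : Int => x == 255) rest
    rw [h] at hle
    simp at hle ⊢
    omega
  · simp

def iter_token_values_alt (tokens : List Int) : List Int := goB tokens

-- ===== PRECONDITION & SPEC =====
def Spec_iter_token_values (tokens : List Int) (out : List Int) : Prop := out = iter_token_values_alt tokens
instance (tokens : List Int) (out : List Int) : Decidable (Spec_iter_token_values tokens out) := by unfold Spec_iter_token_values; infer_instance

-- ===== CLAIM (what is proved, stated in full; the proofs are below) =====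
def Claim_equal_iter_token_values : Prop := ∀ (tokens : List Int), Dom_iter_token_values tokens → Spec_iter_token_values tokens (iter_token_values tokens)

-- ===== LEMMAS AND PROOFS =====
-- A with the flag set behaves like B on a stream still carrying a leading 0xff:
-- prove both states of A's little machine against B simultaneously.
theorem goA_goB (xs : List Int) :
    goA none xs = goB xs ∧ goA (some 255) xs = goB (255 :: xs) := by
  induction xs with
  | nil => constructor <;> simp [goA, goB]
  | cons x r ih =>
    obtain ⟨ih1, ih2⟩ := ih
    by_cases hx : x = 255
    · subst hx
      refine ⟨?_, ?_⟩
      · simpa [goA] using ih2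
      · rw [show goA (some 255) (255 :: r) = goA (some 255) r by simp [goA]]
        rw [ih2]
        simp [goB, List.dropWhile]
    · have hb : (x == (255 : Int)) = false := by simpa using hx
      have hdw : List.dropWhile (fun y => y == (255 : Int)) (x :: r) = x :: r :=
        List.dropWhile_cons_of_neg (by simpa using hx)
      refine ⟨?_, ?_⟩
      · rw [show goA none (x :: r) = x :: goA none r from by simp [goA, hx]]
        rw [goB.eq_def]
        simp [hx, ih1]
      · rw [show goA (some 255) (x :: r) = (((255 : Int) <<< 8) + x) :: goA none r from by
          simp [goA, hx]]
        rw [ih1]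
        conv_rhs => rw [goB.eq_def]
        simp only [reduceIte]
        split
        next heq => rw [hdw] at heq; cases heq
        next u rest' heq =>
          rw [hdw] at heq
          injection heq with h1 h2
          subst h1; subst h2
          norm_num
          decide

-- ===== VERDICT (by name: the statement is the Claim_ definition above) =====
theorem iter_token_values_spec : Claim_equal_iter_token_values := by
  intro tokens _
  unfold Spec_iter_token_values iter_token_values iter_token_values_alt
  exact (goA_goB tokens).1
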